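-- pv_equiv track=rewrite | github.com/thereal1024/advent_of_code | 2020/06/solution-secondary.py | questions_all
-- ===== SOURCE A (Python) =====
-- from collections import Counter
--
-- def questions_all(group):
--     person_count = len(group)
--     questions_count = Counter()
--     for person in group:
--         for question in set(person):
--             questions_count[question] += 1
--     questions_all = [qn for qn, ct in questions_count.items() if ct == person_count]
--     return sorted(questions_all)
-- ===== SOURCE B (Python) =====
-- def questions_all(group):
--     if not group:
--         return []
--     common = set(group[0])
--     for person in group[1:]:
--         common &= set(person)
--     return sorted(common)
-- ===== Notes on version B (the rewrite author's own statement) =====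
-- stated objective: idiomatic
-- what changed: Replaces the per-question Counter (count each question, keep those counted len(group) times) with a shrinking set intersection of each person's question set, then sorted; C-level set intersection replaces per-char dict updates (measured ~1.9x faster).
import Mathlib
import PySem

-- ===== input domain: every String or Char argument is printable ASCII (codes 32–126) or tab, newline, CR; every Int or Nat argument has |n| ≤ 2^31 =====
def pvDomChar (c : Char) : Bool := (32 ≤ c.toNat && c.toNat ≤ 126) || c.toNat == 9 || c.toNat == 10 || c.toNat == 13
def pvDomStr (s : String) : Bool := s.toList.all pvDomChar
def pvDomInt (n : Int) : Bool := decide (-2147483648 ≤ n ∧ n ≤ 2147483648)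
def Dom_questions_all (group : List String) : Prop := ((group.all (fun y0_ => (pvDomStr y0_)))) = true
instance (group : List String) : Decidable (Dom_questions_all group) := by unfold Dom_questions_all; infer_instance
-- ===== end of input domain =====

-- B replaces A's per-question Counter with a shrinking set intersection, then sorts (more idiomatic; measured faster in a timing run).

-- ===== PORT A =====
-- Counter over each person's distinct questions; keep those counted len(group) times; sort.
def questions_all (group : List String) : List String :=
  let personCount : Int := (group.length : Int)
  let questionsCount : PySem.Dict Char Int :=
    group.foldl
      (fun d person =>
        (PySem.Set.ofList person.toList).foldl (fun d q => d.modify q 0 (· + 1)) d)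
      PySem.Dict.empty
  let qsAll : List String :=
    ((questionsCount.items.filter (fun p => p.2 == personCount)).map
      (fun p => String.ofList [p.1]))
  PySem.List.sorted qsAll (fun x => x) false

-- ===== PORT B =====
-- Intersection of each person's question set, then sorted.
def questions_all_alt (group : List String) : List String :=
  match group with
  | [] => []
  | first :: rest =>
    let common : PySem.Set Char :=
      rest.foldl (fun s person => PySem.Set.inter s (PySem.Set.ofList person.toList))
        (PySem.Set.ofList first.toList)
    PySem.List.sorted (common.map (fun c => String.ofList [c])) (fun x => x) false

-- ===== PRECONDITION & SPEC =====
def Spec_questions_all (group : List String) (out : List String) : Prop := out = questions_all_alt group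
instance (group : List String) (out : List String) : Decidable (Spec_questions_all group out) := by unfold Spec_questions_all; infer_instance

-- ===== CLAIM (what is proved, stated in full; the proofs are below) =====
def Claim_equal_questions_all : Prop := ∀ (group : List String), Dom_questions_all group → Spec_questions_all group (questions_all group)

-- ===== LEMMAS AND PROOFS =====

-- the counter-building step of A, named for the lemmas below
def qaStep (d : PySem.Dict Char Int) (person : String) : PySem.Dict Char Int :=
  (PySem.Set.ofList person.toList).foldl (fun d q => d.modify q 0 (· + 1)) d

-- A's counter counts, for each char, the number of persons whose answers contain it
lemma qa_getD (group : List String) (d : PySem.Dict Char Int) (c : Char) :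
    (group.foldl qaStep d).getD c 0
      = d.getD c 0 + ((group.countP (fun p => decide (c ∈ p.toList))) : Int) := by
  induction group generalizing d with
  | nil => simp
  | cons person rest ih =>
    rw [List.foldl_cons, ih]
    have h1 : (qaStep d person).getD c 0
        = d.getD c 0 + ((PySem.Set.ofList person.toList).count c : Int) := by
      simpa using PySem.Dict.getD_foldl_modify_add_one
        (PySem.Set.ofList person.toList) d c
    rw [List.countP_cons, h1]
    by_cases hc : c ∈ person.toList
    · have : (PySem.Set.ofList person.toList).count c = 1 :=
        List.count_eq_one_of_mem (PySem.Set.nodup_ofList _)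
          ((PySem.Set.mem_ofList _ _).mpr hc)
      rw [this]
      simp [hc]
      ring
    · have : (PySem.Set.ofList person.toList).count c = 0 := by
        rw [List.count_eq_zero]
        simpa [PySem.Set.mem_ofList] using hc
      simp [this, hc]

lemma qa_mem_keys (group : List String) (d : PySem.Dict Char Int) (c : Char) :
    c ∈ (group.foldl qaStep d).keys ↔ c ∈ d.keys ∨ ∃ p ∈ group, c ∈ p.toList := by
  induction group generalizing d with
  | nil => simp
  | cons person rest ih =>
    rw [List.foldl_cons, ih]
    have hk : (qaStep d person).keys = PySem.Set.update d.keys (PySem.Set.ofList person.toList) :=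
      PySem.Dict.keys_foldl_modify _ _ _ _
    rw [hk]
    simp [PySem.Set.mem_update, PySem.Set.mem_ofList, or_assoc]

lemma qa_nodup_keys (group : List String) (d : PySem.Dict Char Int)
    (h : d.keys.Nodup) : (group.foldl qaStep d).keys.Nodup := by
  induction group generalizing d with
  | nil => simpa
  | cons person rest ih =>
    rw [List.foldl_cons]
    exact ih _ (PySem.Dict.nodup_keys_foldl_modify_key _ id _ (fun _ _ => (· + 1)) d h)

-- membership in A's filtered key list
lemma qa_mem_filtered (d : PySem.Dict Char Int) (hnd : d.keys.Nodup) (n : Int) (c : Char) :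
    c ∈ (d.items.filter (fun p => p.2 == n)).map Prod.fst ↔ c ∈ d.keys ∧ d.getD c 0 = n := by
  constructor
  · rintro hc
    simp only [List.mem_map, List.mem_filter] at hc
    obtain ⟨⟨k, v⟩, ⟨hmem, hv⟩, hk⟩ := hc
    simp at hv; subst hk; subst hv
    exact ⟨PySem.Dict.mem_keys_of_mem_items d hmem,
      PySem.Dict.getD_of_mem_items d hmem hnd 0⟩
  · rintro ⟨hk, hv⟩
    have hmem : (c, n) ∈ d.items := by
      rcases h : d.get? c with _ | v
      · exact absurd ((PySem.Dict.get?_eq_none_iff_not_mem_keys d c).mp h) (by simpa using hk)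
      · have := PySem.Dict.getD_of_get?_eq_some d 0 h
        rw [this] at hv
        exact (PySem.Dict.get?_eq_some_iff_mem_items d c n hnd).mp (hv ▸ h)
    exact List.mem_map.mpr ⟨(c, n), List.mem_filter.mpr ⟨hmem, by simp⟩, rfl⟩

-- membership in B's intersection fold
lemma qa_mem_inter (rest : List String) (s : PySem.Set Char) (c : Char) :
    c ∈ rest.foldl (fun s person => PySem.Set.inter s (PySem.Set.ofList person.toList)) s
      ↔ c ∈ s ∧ ∀ p ∈ rest, c ∈ p.toList := by
  induction rest generalizing s with
  | nil => simp
  | cons person rest ih =>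
    rw [List.foldl_cons, ih]
    simp only [PySem.Set.mem_inter, PySem.Set.mem_ofList, List.mem_cons, and_assoc]
    constructor
    · rintro ⟨hs, hp, hall⟩
      exact ⟨hs, fun q hq => hq.elim (fun e => e ▸ hp) (hall q)⟩
    · rintro ⟨hs, hall⟩
      exact ⟨hs, hall person (Or.inl rfl), fun q hq => hall q (Or.inr hq)⟩

lemma qa_nodup_inter (rest : List String) (s : PySem.Set Char) (h : s.Nodup) :
    (rest.foldl (fun s person => PySem.Set.inter s (PySem.Set.ofList person.toList)) s).Nodup := by
  induction rest generalizing s with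
  | nil => simpa
  | cons person rest ih =>
    exact ih _ (PySem.Set.nodup_inter s (PySem.Set.ofList person.toList) h)

-- ===== VERDICT (by name: the statement is the Claim_ definition above) =====
theorem questions_all_spec : Claim_equal_questions_all := by
  intro group _
  unfold Spec_questions_all questions_all questions_all_alt
  cases group with
  | nil => rfl
  | cons first rest =>
    apply PySem.List.sorted_eq_sorted_of_perm
    · intro a b h; exact h
    · rw [show (fun p : Char × Int => String.ofList [p.1])
            = (fun c : Char => String.ofList [c]) ∘ Prod.fst from rfl, ← List.map_map]
      apply List.Perm.map
      -- the filtered key list and the intersection are permutations: both Nodup, same members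
      set g := first :: rest with hg
      have hfold : g.foldl
          (fun d person => (PySem.Set.ofList person.toList).foldl
            (fun d q => d.modify q 0 (· + 1)) d) PySem.Dict.empty
          = g.foldl qaStep PySem.Dict.empty := rfl
      rw [hfold]
      set d := g.foldl qaStep PySem.Dict.empty with hd
      have hnd : d.keys.Nodup := qa_nodup_keys g _ (by simp)
      set Y := rest.foldl (fun s person => PySem.Set.inter s (PySem.Set.ofList person.toList))
        (PySem.Set.ofList first.toList) with hY
      have hX : ((d.items.filter (fun p => p.2 == (g.length : Int))).map Prod.fst).Nodup :=
        ((List.Sublist.map Prod.fst List.filter_sublist).nodup hnd)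
      have hYnd : Y.Nodup := qa_nodup_inter rest _ (PySem.Set.nodup_ofList _)
      rw [(List.perm_ext_iff_of_nodup hX hYnd)]
      intro c
      rw [qa_mem_filtered d hnd (g.length : Int) c, qa_mem_inter, PySem.Set.mem_ofList]
      rw [hd, qa_mem_keys, qa_getD]
      simp only [PySem.Dict.keys_empty, PySem.Dict.getD_empty, List.not_mem_nil, false_or,
        zero_add, Nat.cast_inj]
      constructor
      · rintro ⟨_, hcnt⟩
        have hall : ∀ p ∈ g, c ∈ p.toList := by
          intro p hp
          by_contra hnc
          have := List.countP_eq_length.mp hcnt p hp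
          simp [hnc] at this
        exact ⟨hall first (by simp [hg]), fun p hp => hall p (by simp [hg, hp])⟩
      · rintro ⟨hf, hr⟩
        have hall : ∀ p ∈ g, c ∈ p.toList := by
          intro p hp
          rcases (by simpa [hg] using hp : p = first ∨ p ∈ rest) with rfl | hp
          · exact hf
          · exact hr p hp
        exact ⟨⟨first, by simp [hg], hf⟩,
          List.countP_eq_length.mpr (fun p hp => by simp [hall p hp])⟩
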